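-- pv_equiv track=rewrite | github.com/robocomp/robocomp | tools/robocompdsl-gui/parseCDSL.py | getNameNumber
-- ===== SOURCE A (Python) =====
-- from collections import Counter
--
-- def getNameNumber(aalist):
--     ret = []
--     c = Counter(aalist)
--     keys = sorted(c)
--
--     for k in keys:
--         for cont in range(c[k]):
--             if cont > 0:
--                 ret.append([k, str(cont)])
--             else:
--                 ret.append([k, ''])
--     return ret
-- ===== SOURCE B (Python) =====
-- def getNameNumber(aalist):
--     ret = []
--     prev = None
--     cnt = 0
--     for k in sorted(aalist):
--         if k == prev:
--             cnt += 1
--             ret.append([k, str(cnt)])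
--         else:
--             prev = k
--             cnt = 0
--             ret.append([k, ''])
--     return ret
-- ===== Notes on version B (the rewrite author's own statement) =====
-- stated objective: alternative
-- what changed: Replaces Counter + sorted-unique-keys + nested range emission by a single scan of the sorted list with a prev-key/running-counter, emitting '' for the first occurrence and str(i) for the i-th repeat.
import Mathlib
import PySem

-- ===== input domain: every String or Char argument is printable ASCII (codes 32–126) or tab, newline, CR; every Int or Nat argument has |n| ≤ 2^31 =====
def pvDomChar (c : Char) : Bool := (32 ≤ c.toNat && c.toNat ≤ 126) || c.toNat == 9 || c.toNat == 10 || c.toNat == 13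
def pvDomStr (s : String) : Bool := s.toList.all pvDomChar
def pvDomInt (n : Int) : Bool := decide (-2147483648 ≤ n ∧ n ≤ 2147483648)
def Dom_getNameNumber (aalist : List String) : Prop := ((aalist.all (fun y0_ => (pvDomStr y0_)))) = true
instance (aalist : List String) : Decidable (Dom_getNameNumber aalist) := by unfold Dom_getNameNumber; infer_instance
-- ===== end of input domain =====

-- B replaces A's Counter + sorted-unique-keys + nested range emission by a single scan of
-- the sorted list with a running within-group counter (objective: alternative decomposition).

-- ===== PORT A =====
def getNameNumber (aalist : List String) : List (List String) :=
  let ret : List (List String) := []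
  let c := PySem.Dict.counter aalist
  let keys := PySem.List.sorted c.keys (fun x => x) false
  keys.foldl (fun ret k =>
    (PySem.List.pyRange 0 (c.getD k 0) 1).foldl (fun ret cont =>
      if cont > 0 then ret ++ [[k, PySem.Int.toStr cont]]
      else ret ++ [[k, ""]]) ret) ret

-- ===== PORT B =====
-- one step of B's loop body: state = (prev, cnt, ret)
def pvStepB (st : Option String × Int × List (List String)) (k : String) :
    Option String × Int × List (List String) :=
  if some k = st.1 then (st.1, st.2.1 + 1, st.2.2 ++ [[k, PySem.Int.toStr (st.2.1 + 1)]])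
  else (some k, 0, st.2.2 ++ [[k, ""]])

def getNameNumber_alt (aalist : List String) : List (List String) :=
  ((PySem.List.sorted aalist (fun x => x) false).foldl pvStepB (none, 0, [])).2.2

-- ===== PRECONDITION & SPEC =====
def Spec_getNameNumber (aalist : List String) (out : List (List String)) : Prop := out = getNameNumber_alt aalist
instance (aalist : List String) (out : List (List String)) : Decidable (Spec_getNameNumber aalist out) := by unfold Spec_getNameNumber; infer_instance

-- ===== CLAIM (what is proved, stated in full; the proofs are below) =====
def Claim_equal_getNameNumber : Prop := ∀ (aalist : List String), Dom_getNameNumber aalist → Spec_getNameNumber aalist (getNameNumber aalist)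

-- ===== LEMMAS AND PROOFS =====

-- the block of output lines A emits for one key occurring n times
def pvEmit (k : String) (n : Nat) : List (List String) :=
  (List.range n).map (fun (i : Nat) =>
    if (i : Int) > 0 then [k, PySem.Int.toStr (i : Int)] else [k, ""])

-- A's result as a flatMap over the sorted distinct keys
lemma getNameNumber_eq_flatMap (aalist : List String) :
    getNameNumber aalist =
      (PySem.List.sorted (PySem.Set.ofList aalist) (fun x => x) false).flatMap
        (fun k => pvEmit k (aalist.count k)) := by
  unfold getNameNumber
  simp only [PySem.Dict.keys_counter]
  rw [PySem.List.foldl_congr_mem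
    (g := fun ret k => ret ++ pvEmit k (aalist.count k))]
  · rw [PySem.List.foldl_append_eq_flatMap, List.nil_append]
  · intro acc k _
    have h1 : (fun (ret : List (List String)) (cont : Int) =>
        if cont > 0 then ret ++ [[k, PySem.Int.toStr cont]] else ret ++ [[k, ""]])
        = (fun ret cont => ret ++ [if cont > 0 then [k, PySem.Int.toStr cont] else [k, ""]]) := by
      funext ret cont; split_ifs <;> rfl
    rw [h1, PySem.List.foldl_append_singleton_eq_map, PySem.Dict.getD_counter,
      PySem.List.pyRange_zero_natCast, List.map_map]
    rfl

-- scanning one group of m further equal elements, counter already at j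
lemma pvStepB_replicate (m : Nat) (k : String) (j : Int) (ret : List (List String)) :
    (List.replicate m k).foldl pvStepB (some k, j, ret)
      = (some k, j + m, ret ++ (List.range m).map
          (fun (i : Nat) => [k, PySem.Int.toStr (j + (i : Int) + 1)])) := by
  induction m generalizing j ret with
  | zero => simp
  | succ m ih =>
    rw [List.replicate_succ, List.foldl_cons]
    show (List.replicate m k).foldl pvStepB (pvStepB (some k, j, ret) k) = _
    rw [show pvStepB (some k, j, ret) k = (some k, j + 1, ret ++ [[k, PySem.Int.toStr (j + 1)]]) by
      simp [pvStepB]]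
    rw [ih]
    refine congrArg₂ Prod.mk rfl (congrArg₂ Prod.mk (by push_cast; ring) ?_)
    rw [List.range_succ_eq_map, List.map_cons, List.map_map, List.append_assoc,
      List.singleton_append]
    refine congrArg _ ?_
    congr 1
    · refine congrArg (fun s => [k, PySem.Int.toStr s]) ?_
      push_cast; ring
    · apply List.map_congr_left
      intro i _
      simp only [Function.comp_apply]
      refine congrArg (fun s => [k, PySem.Int.toStr s]) ?_
      push_cast; ring

-- scanning one whole group of n occurrences of a fresh key
lemma pvStepB_group (n : Nat) (hn : 0 < n) (k : String) (prev : Option String)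
    (hp : prev ≠ some k) (cnt : Int) (ret : List (List String)) :
    (List.replicate n k).foldl pvStepB (prev, cnt, ret)
      = (some k, (n : Int) - 1, ret ++ pvEmit k n) := by
  obtain ⟨m, rfl⟩ := Nat.exists_eq_succ_of_ne_zero (Nat.pos_iff_ne_zero.mp hn)
  rw [List.replicate_succ, List.foldl_cons]
  have h0 : pvStepB (prev, cnt, ret) k = (some k, 0, ret ++ [[k, ""]]) := by
    simp only [pvStepB]
    rw [if_neg (by simpa [eq_comm] using hp)]
  rw [h0, pvStepB_replicate]
  refine congrArg₂ Prod.mk rfl (congrArg₂ Prod.mk (by push_cast; ring) ?_)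
  unfold pvEmit
  rw [List.range_succ_eq_map, List.map_cons, List.map_map, List.append_assoc,
    List.singleton_append]
  rw [if_neg (by norm_num)]
  refine congrArg _ ?_
  congr 1
  apply List.map_congr_left
  intro i _
  simp only [Function.comp_apply]
  rw [if_pos (by positivity)]
  refine congrArg (fun s => [k, PySem.Int.toStr s]) ?_
  push_cast; ring

-- scanning the concatenation of all groups, keys strictly increasing
lemma pvStepB_scan (K : List String) (hK : K.Pairwise (· < ·)) (n : String → Nat)
    (hn : ∀ k ∈ K, 0 < n k) (prev : Option String) (hp : ∀ k ∈ K, prev ≠ some k)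
    (cnt : Int) (ret : List (List String)) :
    ((K.flatMap (fun k => List.replicate (n k) k)).foldl pvStepB (prev, cnt, ret)).2.2
      = ret ++ K.flatMap (fun k => pvEmit k (n k)) := by
  induction K generalizing prev cnt ret with
  | nil => simp
  | cons k K ih =>
    rw [List.flatMap_cons, List.foldl_append,
      pvStepB_group (n k) (hn k List.mem_cons_self) k prev (hp k List.mem_cons_self)]
    rw [ih (List.Pairwise.sublist (List.sublist_cons_self k K) hK)
      (fun k' hk' => hn k' (List.mem_cons_of_mem _ hk'))
      (some k) ?_ _ _]
    · rw [List.flatMap_cons, List.append_assoc]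
    · intro k' hk' h
      have hlt : k < k' := (List.pairwise_cons.mp hK).1 k' hk'
      exact absurd (Option.some.inj h) (ne_of_lt hlt)

-- the group concatenation over strictly increasing keys is sorted
lemma pvGroups_pairwise (cnt : String → Nat) :
    ∀ (K : List String), K.Pairwise (· < ·) →
      (K.flatMap (fun k => List.replicate (cnt k) k)).Pairwise (· ≤ ·) := by
  intro K
  induction K with
  | nil => simp
  | cons k K ihK =>
    intro hK
    rw [List.flatMap_cons, List.pairwise_append]
    refine ⟨List.pairwise_replicate.mpr (Or.inr le_rfl),
      ihK (List.pairwise_cons.mp hK).2, ?_⟩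
    intro a ha b hb
    rw [List.mem_replicate] at ha
    obtain ⟨k', hk', hbk'⟩ := List.mem_flatMap.mp hb
    rw [List.mem_replicate] at hbk'
    rw [ha.2, hbk'.2]
    exact le_of_lt ((List.pairwise_cons.mp hK).1 k' hk')

-- the sorted list is the concatenation of its groups (sorted distinct keys, multiplicities)
lemma sorted_eq_groups (aalist : List String) :
    PySem.List.sorted aalist (fun x => x) false
      = (PySem.List.sorted (PySem.Set.ofList aalist) (fun x => x) false).flatMap
          (fun k => List.replicate (aalist.count k) k) := by
  set K := PySem.List.sorted (PySem.Set.ofList aalist) (fun x => x) false with hKdef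
  have hKlt : K.Pairwise (· < ·) := PySem.List.sorted_ofList_pairwise_lt aalist
  have hnd : K.Nodup := List.Pairwise.imp (fun h => ne_of_lt h) hKlt
  have hmem : ∀ x, x ∈ K ↔ x ∈ aalist := by
    intro x
    rw [hKdef, PySem.List.mem_sorted, PySem.Set.mem_ofList]
  apply PySem.List.sorted_id_eq_of_perm_of_pairwise
  · -- permutation: count-wise equality
    rw [List.perm_iff_count]
    intro v
    rw [List.count_flatMap]
    simp only [Function.comp_def]
    have hsum : ∀ (L : List String), L.Nodup →
        (L.map (fun k => List.count v (List.replicate (aalist.count k) k))).sum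
          = if v ∈ L then aalist.count v else 0 := by
      intro L hL
      induction L with
      | nil => simp
      | cons a L ihL =>
        rcases List.nodup_cons.mp hL with ⟨haL, hLnd⟩
        rw [List.map_cons, List.sum_cons, ihL hLnd, List.count_replicate]
        by_cases hav : a = v
        · subst hav
          simp [haL]
        · simp [hav, Ne.symm hav, List.mem_cons]
    rw [hsum K hnd]
    by_cases hv : v ∈ aalist
    · rw [if_pos ((hmem v).mpr hv)]
    · rw [if_neg (fun h => hv ((hmem v).mp h)), List.count_eq_zero_of_not_mem hv]
  · exact pvGroups_pairwise _ K hKlt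

-- ===== VERDICT (by name: the statement is the Claim_ definition above) =====
theorem getNameNumber_spec : Claim_equal_getNameNumber := by
  intro aalist _
  unfold Spec_getNameNumber getNameNumber_alt
  have hs := pvStepB_scan (PySem.List.sorted (PySem.Set.ofList aalist) (fun x => x) false)
    (PySem.List.sorted_ofList_pairwise_lt aalist) (fun k => aalist.count k)
    (fun k hk => by
      rw [PySem.List.mem_sorted, PySem.Set.mem_ofList] at hk
      exact List.count_pos_iff.mpr hk)
    none (by simp) 0 []
  rw [getNameNumber_eq_flatMap]
  conv_rhs => rw [sorted_eq_groups aalist]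
  rw [hs, List.nil_append]
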